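-- pv_equiv track=rewrite | github.com/openzim/python-scraperlib | src/zimscraperlib/zim/_libkiwix.py | convertTags
-- ===== SOURCE A (Python) =====
-- from typing import Dict, List, Optional, Tuple
--
-- def convertTags(tags_str: str) -> List[str]:  # noqa: N802
--     """List of tags expanded with libkiwix's additional hints for pic/vid/det/index"""
--     tags = tags_str.split(";")
--     tagsList = []  # noqa: N806
--     picSeen = vidSeen = detSeen = indexSeen = False  # noqa: N806
--     for tag in tags:
--         # not upstream
--         if not tag:
--             continue
--         picSeen |= tag == "nopic" or tag.startswith("_pictures:")  # noqa: N806
--         vidSeen |= tag == "novid" or tag.startswith("_videos:")  # noqa: N806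
--         detSeen |= tag == "nodet" or tag.startswith("_details:")  # noqa: N806
--         indexSeen |= tag.startswith("_ftindex")  # noqa: N806
--
--         if tag == "nopic":
--             tagsList.append("_pictures:no")
--         elif tag == "novid":
--             tagsList.append("_videos:no")
--         elif tag == "nodet":
--             tagsList.append("_details:no")
--         elif tag == "_ftindex":
--             tagsList.append("_ftindex:yes")
--         else:
--             tagsList.append(tag)
--
--     if not indexSeen:
--         tagsList.append("_ftindex:no")
--     if not picSeen:
--         tagsList.append("_pictures:yes")
--     if not vidSeen:
--         tagsList.append("_videos:yes")
--     if not detSeen: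
--         tagsList.append("_details:yes")
--     return tagsList
-- ===== SOURCE B (Python) =====
-- _MAP = {
--     "nopic": "_pictures:no",
--     "novid": "_videos:no",
--     "nodet": "_details:no",
--     "_ftindex": "_ftindex:yes",
-- }
--
--
-- def convertTags(tags_str):
--     """List of tags expanded with libkiwix's additional hints for pic/vid/det/index"""
--     tagsList = [_MAP.get(t, t) for t in tags_str.split(";") if t]
--     if not any(t.startswith("_ftindex") for t in tagsList):
--         tagsList.append("_ftindex:no")
--     if not any(t.startswith("_pictures:") for t in tagsList):
--         tagsList.append("_pictures:yes")
--     if not any(t.startswith("_videos:") for t in tagsList):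
--         tagsList.append("_videos:yes")
--     if not any(t.startswith("_details:") for t in tagsList):
--         tagsList.append("_details:yes")
--     return tagsList
-- ===== Notes on version B (the rewrite author's own statement) =====
-- stated objective: simpler
-- what changed: Replaces A's single fused loop with four inline boolean flags by a table-driven map/filter pass that builds the transformed list, followed by four prefix scans over that list to decide which default hints to append.
import Mathlib
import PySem

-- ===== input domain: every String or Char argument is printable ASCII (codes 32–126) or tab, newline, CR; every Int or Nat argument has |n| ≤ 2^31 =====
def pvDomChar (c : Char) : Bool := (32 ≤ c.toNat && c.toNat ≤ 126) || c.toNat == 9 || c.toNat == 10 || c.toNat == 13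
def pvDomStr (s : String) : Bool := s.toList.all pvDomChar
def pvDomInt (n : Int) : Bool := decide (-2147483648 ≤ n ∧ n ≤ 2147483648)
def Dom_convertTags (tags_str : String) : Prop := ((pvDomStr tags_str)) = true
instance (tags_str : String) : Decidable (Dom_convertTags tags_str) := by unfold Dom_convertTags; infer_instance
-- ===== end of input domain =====

-- B replaces A's single fused loop with four inline boolean flags by a map/filter pass through a
-- fixed translation dict followed by four prefix scans deciding the default hints (objective: simpler).


-- ===== PORT A =====
-- state: (tagsList, picSeen, vidSeen, detSeen, indexSeen)
def convertTagsStep (st : List String × Bool × Bool × Bool × Bool) (tag : String) :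
    List String × Bool × Bool × Bool × Bool :=
  if tag == "" then st
  else
    let (tagsList, picSeen, vidSeen, detSeen, indexSeen) := st
    let picSeen := picSeen || (tag == "nopic" || PySem.Str.startswith tag "_pictures:")
    let vidSeen := vidSeen || (tag == "novid" || PySem.Str.startswith tag "_videos:")
    let detSeen := detSeen || (tag == "nodet" || PySem.Str.startswith tag "_details:")
    let indexSeen := indexSeen || PySem.Str.startswith tag "_ftindex"
    let tagsList := tagsList ++
      [if tag == "nopic" then "_pictures:no"
       else if tag == "novid" then "_videos:no"
       else if tag == "nodet" then "_details:no"
       else if tag == "_ftindex" then "_ftindex:yes"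
       else tag]
    (tagsList, picSeen, vidSeen, detSeen, indexSeen)

-- tags_str.split(";"): split? is always `some` for the nonempty literal separator ";"
def convertTags (tags_str : String) : List String :=
  let tags := (PySem.Str.split? tags_str ";").getD []
  let st := tags.foldl convertTagsStep ([], false, false, false, false)
  let (tagsList, picSeen, vidSeen, detSeen, indexSeen) := st
  let tagsList := if !indexSeen then tagsList ++ ["_ftindex:no"] else tagsList
  let tagsList := if !picSeen then tagsList ++ ["_pictures:yes"] else tagsList
  let tagsList := if !vidSeen then tagsList ++ ["_videos:yes"] else tagsList
  let tagsList := if !detSeen then tagsList ++ ["_details:yes"] else tagsList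
  tagsList

-- ===== PORT B =====
def convertTagsMap : PySem.Dict String String :=
  PySem.Dict.mk
    [("nopic", "_pictures:no"), ("novid", "_videos:no"),
     ("nodet", "_details:no"), ("_ftindex", "_ftindex:yes")]

def convertTags_alt (tags_str : String) : List String :=
  let tagsList := (((PySem.Str.split? tags_str ";").getD []).filter (fun t => !(t == ""))).map
    (fun t => convertTagsMap.getD t t)
  let tagsList :=
    if !(tagsList.any (fun t => PySem.Str.startswith t "_ftindex")) then
      tagsList ++ ["_ftindex:no"] else tagsList
  let tagsList :=
    if !(tagsList.any (fun t => PySem.Str.startswith t "_pictures:")) then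
      tagsList ++ ["_pictures:yes"] else tagsList
  let tagsList :=
    if !(tagsList.any (fun t => PySem.Str.startswith t "_videos:")) then
      tagsList ++ ["_videos:yes"] else tagsList
  let tagsList :=
    if !(tagsList.any (fun t => PySem.Str.startswith t "_details:")) then
      tagsList ++ ["_details:yes"] else tagsList
  tagsList

-- ===== PRECONDITION & SPEC =====
def Spec_convertTags (tags_str : String) (out : List String) : Prop := out = convertTags_alt tags_str
instance (tags_str : String) (out : List String) : Decidable (Spec_convertTags tags_str out) := by unfold Spec_convertTags; infer_instance

-- ===== CLAIM (what is proved, stated in full; the proofs are below) =====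
def Claim_equal_convertTags : Prop := ∀ (tags_str : String), Dom_convertTags tags_str → Spec_convertTags tags_str (convertTags tags_str)

-- ===== LEMMAS AND PROOFS =====

-- B's transformed list of a list of raw tags
def pvTL (ts : List String) : List String :=
  (ts.filter (fun t => !(t == ""))).map (fun t => convertTagsMap.getD t t)

theorem pvTL_cons (t : String) (ts : List String) :
    pvTL (t :: ts) = if t == "" then pvTL ts else convertTagsMap.getD t t :: pvTL ts := by
  by_cases h : t = ""
  · simp [pvTL, h]
  · simp [pvTL, h]

-- the dict lookup equals A's inline if-chain
theorem pvMap_eq (t : String) :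
    convertTagsMap.getD t t =
      (if t == "nopic" then "_pictures:no"
       else if t == "novid" then "_videos:no"
       else if t == "nodet" then "_details:no"
       else if t == "_ftindex" then "_ftindex:yes"
       else t) := by
  by_cases h1 : t = "nopic"
  · subst h1; decide
  by_cases h2 : t = "novid"
  · subst h2; decide
  by_cases h3 : t = "nodet"
  · subst h3; decide
  by_cases h4 : t = "_ftindex"
  · subst h4; decide
  have b1 : ("nopic" == t) = false := beq_eq_false_iff_ne.mpr (Ne.symm h1)
  have b2 : ("novid" == t) = false := beq_eq_false_iff_ne.mpr (Ne.symm h2)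
  have b3 : ("nodet" == t) = false := beq_eq_false_iff_ne.mpr (Ne.symm h3)
  have b4 : ("_ftindex" == t) = false := beq_eq_false_iff_ne.mpr (Ne.symm h4)
  simp [convertTagsMap, PySem.Dict.getD, PySem.Dict.get?, List.find?, b1, b2, b3, b4,
    h1, h2, h3, h4]

-- per-tag flag correspondence
theorem pvFlag_pic (t : String) :
    (t == "nopic" || PySem.Str.startswith t "_pictures:") =
      PySem.Str.startswith (convertTagsMap.getD t t) "_pictures:" := by
  rw [pvMap_eq]
  by_cases h1 : t = "nopic" <;> by_cases h2 : t = "novid" <;>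
    by_cases h3 : t = "nodet" <;> by_cases h4 : t = "_ftindex" <;> simp_all <;>
    rfl

theorem pvFlag_vid (t : String) :
    (t == "novid" || PySem.Str.startswith t "_videos:") =
      PySem.Str.startswith (convertTagsMap.getD t t) "_videos:" := by
  rw [pvMap_eq]
  by_cases h1 : t = "nopic" <;> by_cases h2 : t = "novid" <;>
    by_cases h3 : t = "nodet" <;> by_cases h4 : t = "_ftindex" <;> simp_all <;>
    rfl

theorem pvFlag_det (t : String) :
    (t == "nodet" || PySem.Str.startswith t "_details:") =
      PySem.Str.startswith (convertTagsMap.getD t t) "_details:" := by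
  rw [pvMap_eq]
  by_cases h1 : t = "nopic" <;> by_cases h2 : t = "novid" <;>
    by_cases h3 : t = "nodet" <;> by_cases h4 : t = "_ftindex" <;> simp_all <;>
    rfl

theorem pvFlag_idx (t : String) :
    PySem.Str.startswith t "_ftindex" =
      PySem.Str.startswith (convertTagsMap.getD t t) "_ftindex" := by
  rw [pvMap_eq]
  by_cases h1 : t = "nopic" <;> by_cases h2 : t = "novid" <;>
    by_cases h3 : t = "nodet" <;> by_cases h4 : t = "_ftindex" <;> simp_all <;>
    rfl

-- loop invariant: A's fold = transformed list plus any-scans of it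
theorem pvLoop_spec (ts : List String) (acc : List String) (p v d i : Bool) :
    ts.foldl convertTagsStep (acc, p, v, d, i) =
      (acc ++ pvTL ts,
       p || (pvTL ts).any (fun t => PySem.Str.startswith t "_pictures:"),
       v || (pvTL ts).any (fun t => PySem.Str.startswith t "_videos:"),
       d || (pvTL ts).any (fun t => PySem.Str.startswith t "_details:"),
       i || (pvTL ts).any (fun t => PySem.Str.startswith t "_ftindex")) := by
  induction ts generalizing acc p v d i with
  | nil => simp [pvTL]
  | cons t ts ih =>
    rw [List.foldl_cons]
    by_cases h : t = ""
    · subst h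
      rw [show convertTagsStep (acc, p, v, d, i) "" = (acc, p, v, d, i) from rfl, ih]
      simp [pvTL_cons]
    · have ht : (t == "") = false := by simp [h]
      have hstep : convertTagsStep (acc, p, v, d, i) t =
          (acc ++ [convertTagsMap.getD t t],
           p || PySem.Str.startswith (convertTagsMap.getD t t) "_pictures:",
           v || PySem.Str.startswith (convertTagsMap.getD t t) "_videos:",
           d || PySem.Str.startswith (convertTagsMap.getD t t) "_details:",
           i || PySem.Str.startswith (convertTagsMap.getD t t) "_ftindex") := by
        simp only [convertTagsStep, ht, Bool.false_eq_true, if_false]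
        rw [pvFlag_pic t, pvFlag_vid t, pvFlag_det t, pvFlag_idx t, ← pvMap_eq]
      rw [hstep, ih]
      simp [pvTL_cons, h, Bool.or_assoc]

-- ===== VERDICT (by name: the statement is the Claim_ definition above) =====
theorem convertTags_spec : Claim_equal_convertTags := by
  intro s _
  unfold Spec_convertTags
  simp only [convertTags, convertTags_alt]
  rw [pvLoop_spec]
  simp only [List.nil_append, Bool.false_or, pvTL]
  generalize ((((PySem.Str.split? s ";").getD []).filter (fun t => !(t == ""))).map (fun t => convertTagsMap.getD t t)) = tl
  have e1 : PySem.Str.startswith "_ftindex:no" "_pictures:" = false := by decide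
  have e2 : PySem.Str.startswith "_ftindex:no" "_videos:" = false := by decide
  have e3 : PySem.Str.startswith "_ftindex:no" "_details:" = false := by decide
  have e4 : PySem.Str.startswith "_pictures:yes" "_videos:" = false := by decide
  have e5 : PySem.Str.startswith "_pictures:yes" "_details:" = false := by decide
  have e6 : PySem.Str.startswith "_videos:yes" "_details:" = false := by decide
  by_cases hi : tl.any (fun t => PySem.Str.startswith t "_ftindex")
  all_goals by_cases hp : tl.any (fun t => PySem.Str.startswith t "_pictures:")
  all_goals by_cases hv : tl.any (fun t => PySem.Str.startswith t "_videos:")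
  all_goals by_cases hd : tl.any (fun t => PySem.Str.startswith t "_details:")
  all_goals simp only [hi, hp, hv, hd, List.any_append, List.any_cons, List.any_nil, e1, e2, e3, e4, e5, e6, Bool.or_false, Bool.not_true, Bool.not_false, Bool.false_eq_true, if_true, if_false]
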